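-- pv_equiv track=rewrite | github.com/eigenmiao/Rickrack | src/main/python/ricore/check.py | fmt_name
-- ===== SOURCE A (Python) =====
-- def fmt_name(name):
--     """
--     Delete prefix and endfix of name.
--     """
--
--     stri = str(name).lstrip().rstrip()
--     stri_prefix = ("Rickrack ", "Rickrack-", "Rickrack:")
--     stri_endfix = tuple([str(i) for i in range(10)] + ["-", ":", " "])
--
--     while len(stri) >= 9 and stri[:9] in stri_prefix:
--         stri = stri[9:].lstrip()
--
--     while len(stri) >= 1 and stri[-1] in stri_endfix:
--         stri = stri[:-1]
--
--     if stri: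
--         return stri
--
--     else:
--         return "Rickrack"
-- ===== SOURCE B (Python) =====
-- def fmt_name(name):
--     """
--     Delete prefix and endfix of name.
--     """
--     def drop_prefix(s):
--         if s.startswith("Rickrack") and s[8:9] in (" ", "-", ":"):
--             return drop_prefix(s[9:].lstrip())
--         return s
--
--     stri = drop_prefix(str(name).strip()).rstrip("0123456789-: ")
--     return stri if stri else "Rickrack"
-- ===== Notes on version B (the rewrite author's own statement) =====
-- stated objective: idiomatic
-- what changed: A's trailing-character while-loop becomes a single rstrip("0123456789-: ") call and its slice-and-compare prefix while-loop becomes a recursive helper keyed on startswith("Rickrack") plus one separator character.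
import Mathlib
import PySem

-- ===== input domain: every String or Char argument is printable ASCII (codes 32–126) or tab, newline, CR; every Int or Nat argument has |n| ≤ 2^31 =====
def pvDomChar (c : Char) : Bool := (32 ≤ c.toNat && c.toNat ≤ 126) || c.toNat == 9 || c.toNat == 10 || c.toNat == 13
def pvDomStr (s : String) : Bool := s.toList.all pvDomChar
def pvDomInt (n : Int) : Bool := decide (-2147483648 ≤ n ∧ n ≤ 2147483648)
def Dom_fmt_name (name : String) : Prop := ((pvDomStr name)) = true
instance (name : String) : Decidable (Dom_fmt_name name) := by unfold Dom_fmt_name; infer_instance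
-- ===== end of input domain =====

-- B replaces A's two hand-rolled while-loops by a recursive prefix-dropper keyed on
-- startswith plus a single rstrip("0123456789-: ") call (objective: idiomatic; same cost).

-- termination helpers cited by the ports' decreasing_by
theorem pvSlice9 (s : List Char) : PySem.Chars.slice s (some 9) none = s.drop 9 := by
  simp [PySem.Chars.slice_eq_listSlice, PySem.List.slice_some_none]

theorem pvSlice89 (s : List Char) : PySem.Chars.slice s (some 8) (some 9) = (s.drop 8).take 1 := by
  simp only [PySem.Chars.slice_eq_listSlice]
  rw [PySem.List.slice_toNat s (by norm_num) (by norm_num)]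
  rfl

-- ===== PORT A =====
def pvA_prefix : List (List Char) :=
  ["Rickrack ".toList, "Rickrack-".toList, "Rickrack:".toList]

def pvA_endfix : List (List Char) :=
  ((PySem.List.pyRange 0 10 1).map (fun i => PySem.Int.toChars i)) ++ [['-'], [':'], [' ']]

-- stri[-1] in stri_endfix (false on the empty string, where Python's len guard stops first)
def pvA_lastHit (s : List Char) : Bool :=
  match PySem.List.pyGet? s (-1) with
  | some c => pvA_endfix.contains [c]
  | none => false

def pvA_loop1 (s : List Char) : List Char :=
  if h : 9 ≤ s.length ∧ PySem.Chars.slice s none (some 9) ∈ pvA_prefix then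
    pvA_loop1 (PySem.Chars.lstrip (PySem.Chars.slice s (some 9) none))
  else s
termination_by s.length
decreasing_by
  rw [pvSlice9]
  simp only [PySem.Chars.lstrip]
  have := List.length_dropWhile_le PySem.Chars.isspace (s.drop 9)
  simp only [List.length_drop] at this
  omega

def pvA_loop2 (s : List Char) : List Char :=
  if h : 1 ≤ s.length ∧ pvA_lastHit s = true then
    pvA_loop2 (PySem.Chars.slice s none (some (-1)))
  else s
termination_by s.length
decreasing_by
  simp only [PySem.Chars.slice_eq_listSlice, PySem.List.slice_to_neg_one, List.length_dropLast]
  omega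

def fmt_name (name : String) : String :=
  let stri := PySem.Chars.rstrip (PySem.Chars.lstrip name.toList)
  let stri := pvA_loop1 stri
  let stri := pvA_loop2 stri
  if stri ≠ [] then String.ofList stri else "Rickrack"

-- ===== PORT B =====
def pvB_dropPrefix (s : List Char) : List Char :=
  if h : PySem.Chars.startswith s "Rickrack".toList = true ∧
      PySem.Chars.slice s (some 8) (some 9) ∈ [[' '], ['-'], [':']] then
    pvB_dropPrefix (PySem.Chars.lstrip (PySem.Chars.slice s (some 9) none))
  else s
termination_by s.length
decreasing_by
  rw [pvSlice9]
  simp only [PySem.Chars.lstrip]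
  have h1 := h.2
  rw [pvSlice89] at h1
  have h9 : 9 ≤ s.length := by
    simp only [List.mem_cons, List.not_mem_nil, or_false] at h1
    have hlen : ((s.drop 8).take 1).length = 1 := by
      rcases h1 with h1 | h1 | h1 <;> simp [h1]
    simp only [List.length_take, List.length_drop] at hlen
    omega
  have := List.length_dropWhile_le PySem.Chars.isspace (s.drop 9)
  simp only [List.length_drop] at this
  omega

-- hand port of s.rstrip(chars): drop the trailing run of chars (exact: per-char set membership)
def pvB_rstripChars (s : List Char) (chars : List Char) : List Char :=
  (s.reverse.dropWhile (fun c => chars.contains c)).reverse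

def fmt_name_alt (name : String) : String :=
  let stri := pvB_rstripChars (pvB_dropPrefix (PySem.Chars.strip name.toList)) "0123456789-: ".toList
  if stri ≠ [] then String.ofList stri else "Rickrack"

-- ===== PRECONDITION & SPEC =====
def Spec_fmt_name (name : String) (out : String) : Prop := out = fmt_name_alt name
instance (name : String) (out : String) : Decidable (Spec_fmt_name name out) := by unfold Spec_fmt_name; infer_instance

-- ===== CLAIM (what is proved, stated in full; the proofs are below) =====
def Claim_equal_fmt_name : Prop := ∀ (name : String), Dom_fmt_name name → Spec_fmt_name name (fmt_name name)

-- ===== LEMMAS AND PROOFS =====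

theorem pvTake9 (s : List Char) : PySem.Chars.slice s none (some 9) = s.take 9 := by
  simp [PySem.Chars.slice_eq_listSlice, PySem.List.slice_to]

theorem pvA_prefix_eval :
    pvA_prefix = [("Rickrack".toList ++ [' ']), ("Rickrack".toList ++ ['-']), ("Rickrack".toList ++ [':'])] := by
  decide

theorem take_split9 (s : List Char) : s.take 9 = s.take 8 ++ (s.drop 8).take 1 := by
  rw [← List.take_add]

theorem cond1_iff (s : List Char) :
    (9 ≤ s.length ∧ PySem.Chars.slice s none (some 9) ∈ pvA_prefix) ↔
    (PySem.Chars.startswith s "Rickrack".toList = true ∧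
      PySem.Chars.slice s (some 8) (some 9) ∈ [[' '], ['-'], [':']]) := by
  rw [pvTake9, pvSlice89, pvA_prefix_eval, PySem.Chars.startswith_iff]
  constructor
  · rintro ⟨hlen, hmem⟩
    simp only [List.mem_cons, List.not_mem_nil, or_false] at hmem
    have h8 : (s.take 8).length = 8 := by simp; omega
    have key : ∀ c : Char, s.take 9 = "Rickrack".toList ++ [c] →
        ("Rickrack".toList <+: s ∧ (s.drop 8).take 1 = [c]) := by
      intro c hc
      rw [take_split9 s] at hc
      have := List.append_inj hc (by simpa using h8)
      exact ⟨this.1 ▸ List.take_prefix 8 s, this.2⟩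
    rcases hmem with hm | hm | hm <;>
      · rcases key _ hm with ⟨hp, he⟩
        exact ⟨hp, by simp [he]⟩
  · rintro ⟨hp, hmem⟩
    have h8 : s.take 8 = "Rickrack".toList := by
      have := List.prefix_iff_eq_take.1 hp
      simpa using this.symm
    simp only [List.mem_cons, List.not_mem_nil, or_false] at hmem
    have hlen : 9 ≤ s.length := by
      have hl : ((s.drop 8).take 1).length = 1 := by
        rcases hmem with hm | hm | hm <;> simp [hm]
      simp only [List.length_take, List.length_drop] at hl
      omega
    refine ⟨hlen, ?_⟩
    rw [take_split9 s, h8]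
    rcases hmem with hm | hm | hm <;> simp [hm]

theorem loop_eq (s : List Char) : pvA_loop1 s = pvB_dropPrefix s := by
  induction s using pvA_loop1.induct with
  | case1 s h ih =>
    rw [pvA_loop1, dif_pos h, pvB_dropPrefix, dif_pos ((cond1_iff s).1 h), ih]
  | case2 s h =>
    rw [pvA_loop1, dif_neg h, pvB_dropPrefix, dif_neg (fun hb => h ((cond1_iff s).2 hb))]

theorem hit_iff (c : Char) :
    (pvA_endfix.contains [c] = true) ↔ ("0123456789-: ".toList.contains c = true) := by
  have he : pvA_endfix =
      [['0'],['1'],['2'],['3'],['4'],['5'],['6'],['7'],['8'],['9'],['-'],[':'],[' ']] := by decide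
  rw [he]
  simp

theorem pyGet_concat (t : List Char) (c : Char) : PySem.List.pyGet? (t ++ [c]) (-1) = some c := by
  simp [PySem.List.pyGet?, PySem.List.pyIdx?]

theorem loop2_eq (s : List Char) : pvA_loop2 s = pvB_rstripChars s "0123456789-: ".toList := by
  induction s using pvA_loop2.induct with
  | case1 s h ih =>
    rcases s.eq_nil_or_concat' with rfl | ⟨t, c, rfl⟩
    · simp at h
    · have hc : "0123456789-: ".toList.contains c = true := by
        have := h.2
        rw [pvA_lastHit, pyGet_concat] at this
        exact (hit_iff c).1 this
      rw [pvA_loop2, dif_pos h, ih]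
      simp only [pvB_rstripChars, List.reverse_append, List.reverse_cons, List.reverse_nil,
        List.nil_append, List.singleton_append, List.dropWhile_cons, hc]
      congr 1
      simp [PySem.Chars.slice_eq_listSlice, PySem.List.slice_to_neg_one]
  | case2 s h =>
    rw [pvA_loop2, dif_neg h]
    rcases s.eq_nil_or_concat' with rfl | ⟨t, c, rfl⟩
    · simp [pvB_rstripChars]
    · have hc : ¬ ("0123456789-: ".toList.contains c = true) := by
        intro hcc
        apply h
        refine ⟨by simp, ?_⟩
        rw [pvA_lastHit, pyGet_concat]
        exact (hit_iff c).2 hcc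
      simp only [pvB_rstripChars, List.reverse_append, List.reverse_cons, List.reverse_nil,
        List.nil_append, List.singleton_append, List.dropWhile_cons]
      rw [if_neg (by simpa using hc)]
      simp

-- ===== VERDICT (by name: the statement is the Claim_ definition above) =====
theorem fmt_name_spec : Claim_equal_fmt_name := by
  intro name _
  unfold Spec_fmt_name fmt_name fmt_name_alt
  simp only [PySem.Chars.strip, loop_eq, loop2_eq]
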